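-- pv_equiv track=rewrite | github.com/t-reppert/bitesofpy | 287/sum_indices.py | sum_indices
-- ===== SOURCE A (Python) =====
-- from typing import List
-- from collections import defaultdict
-- from copy import deepcopy
--
-- def sum_indices(items: List[str]) -> int:
--     totals = []
--     indexes = defaultdict(list)
--     for idx,i in enumerate(items):
--         prev_indexes = deepcopy(indexes[i])
--         indexes[i].append(idx)
--         totals.append(idx+sum(prev_indexes))
--     return sum(totals)
-- ===== SOURCE B (Python) =====
-- def _group_contrib(idxs):
--     # for occurrences j_0 < j_1 < ... of one item, each j_s is "previous"
--     # for the m-1-s later occurrences, contributing j_s * (m-1-s)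
--     m = len(idxs)
--     total = 0
--     for s, j in enumerate(idxs):
--         total += j * (m - 1 - s)
--     return total
--
-- def sum_indices(items):
--     groups = {}
--     for idx, item in enumerate(items):
--         groups.setdefault(item, []).append(idx)
--     n = len(items)
--     return n * (n - 1) // 2 + sum(_group_contrib(g) for g in groups.values())
-- ===== Notes on version B (the rewrite author's own statement) =====
-- stated objective: faster
-- what changed: Instead of simulating the loop (per-step deep copy and re-summation of each item's previous-index list), B groups the indices by item in one pass, uses the closed form n*(n-1)//2 for the plain index sum, and adds each group's pairwise contribution sum(j_s*(m-1-s)).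
import Mathlib
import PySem

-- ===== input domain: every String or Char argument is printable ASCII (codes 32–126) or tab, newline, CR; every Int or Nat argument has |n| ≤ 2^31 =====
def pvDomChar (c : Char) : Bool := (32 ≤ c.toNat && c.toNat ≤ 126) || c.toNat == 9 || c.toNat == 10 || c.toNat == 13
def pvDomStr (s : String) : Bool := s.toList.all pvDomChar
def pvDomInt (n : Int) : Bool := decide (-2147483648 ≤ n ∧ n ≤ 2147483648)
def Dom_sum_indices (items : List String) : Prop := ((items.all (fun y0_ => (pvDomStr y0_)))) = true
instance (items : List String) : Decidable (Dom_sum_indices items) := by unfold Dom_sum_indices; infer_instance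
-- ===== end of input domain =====

-- B replaces A's per-step deep copy and re-summation (O(n^2)) by a group-by pass plus the
-- closed form n*(n-1)//2 for the plain index sum and each group's pairwise term sum j_s*(m-1-s): O(n).

-- ===== PORT A =====
-- loop body: prev_indexes = deepcopy(indexes[i]); indexes[i].append(idx); totals.append(idx+sum(prev_indexes))
def sum_indices_stepA (st : List Int × PySem.Dict String (List Int)) (p : Int × String) :
    List Int × PySem.Dict String (List Int) :=
  let prev := st.2.getD p.2 []
  (st.1 ++ [p.1 + prev.sum], st.2.modify p.2 [] (· ++ [p.1]))

def sum_indices (items : List String) : Int :=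
  (((PySem.List.enumerate items).foldl sum_indices_stepA ([], PySem.Dict.empty)).1).sum

-- ===== PORT B =====
-- _group_contrib: m = len(idxs); for s, j in enumerate(idxs): total += j * (m - 1 - s)
def sum_indices_contrib (idxs : List Int) : Int :=
  (PySem.List.enumerate idxs).foldl
    (fun total p => total + p.2 * ((idxs.length : Int) - 1 - p.1)) 0

-- groups.setdefault(item, []).append(idx)
def sum_indices_groupStep (g : PySem.Dict String (List Int)) (p : Int × String) :
    PySem.Dict String (List Int) :=
  g.modify p.2 [] (· ++ [p.1])

def sum_indices_alt (items : List String) : Int :=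
  let groups := (PySem.List.enumerate items).foldl sum_indices_groupStep PySem.Dict.empty
  let n : Int := items.length
  PySem.Int.floordiv (n * (n - 1)) 2 + (groups.values.map sum_indices_contrib).sum

-- ===== PRECONDITION & SPEC =====
def Spec_sum_indices (items : List String) (out : Int) : Prop := out = sum_indices_alt items
instance (items : List String) (out : Int) : Decidable (Spec_sum_indices items out) := by unfold Spec_sum_indices; infer_instance

-- ===== CLAIM (what is proved, stated in full; the proofs are below) =====
def Claim_equal_sum_indices : Prop := ∀ (items : List String), Dom_sum_indices items → Spec_sum_indices items (sum_indices items)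

-- ===== LEMMAS AND PROOFS =====

-- indices at which key k occurs in the pair list l
def pvOcc (l : List (Int × String)) (k : String) : List Int :=
  ((l.map Prod.swap).filter (fun q => q.1 == k)).map (·.2)

theorem pvEnumerate_append_singleton {α : Type} (xs : List α) (x : α) (s : Int) :
    PySem.List.enumerate (xs ++ [x]) s
      = PySem.List.enumerate xs s ++ [(s + xs.length, x)] := by
  induction xs generalizing s with
  | nil => simp [PySem.List.enumerate_cons, PySem.List.enumerate_nil]
  | cons a t ih =>
    simp only [List.cons_append, PySem.List.enumerate_cons, ih, List.length_cons]
    have h1 : s + 1 + (t.length : Int) = s + ((t.length : Int) + 1) := by ring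
    push_cast
    rw [h1]

theorem pvContrib_singleton (j : Int) : sum_indices_contrib [j] = 0 := by
  simp [sum_indices_contrib, PySem.List.enumerate_cons, PySem.List.enumerate_nil]

theorem pvContrib_eq_sum (idxs : List Int) :
    sum_indices_contrib idxs
      = ((PySem.List.enumerate idxs).map
          (fun p => p.2 * ((idxs.length : Int) - 1 - p.1))).sum := by
  unfold sum_indices_contrib
  rw [PySem.List.foldl_add]
  ring

theorem pvContrib_append (xs : List Int) (j : Int) :
    sum_indices_contrib (xs ++ [j]) = sum_indices_contrib xs + xs.sum := by
  rw [pvContrib_eq_sum, pvContrib_eq_sum, pvEnumerate_append_singleton, List.map_append,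
    List.sum_append]
  simp only [List.map_cons, List.map_nil, List.sum_cons, List.sum_nil, List.length_append,
    List.length_cons, List.length_nil, zero_add]
  have hmap : List.map (fun p : Int × Int => p.2 * ((((xs.length + 1 : Nat)) : Int) - 1 - p.1))
        (PySem.List.enumerate xs)
      = List.map (fun p : Int × Int => p.2 * ((xs.length : Int) - 1 - p.1) + p.2)
        (PySem.List.enumerate xs) := by
    apply List.map_congr_left; intro p _; push_cast; ring
  rw [hmap, PySem.List.sum_map_add_int, PySem.List.map_snd_enumerate]
  push_cast
  ring

theorem pvSndA (l : List (Int × String)) :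
    ∀ (ts : List Int) (d : PySem.Dict String (List Int)),
    (l.foldl sum_indices_stepA (ts, d)).2 = l.foldl sum_indices_groupStep d := by
  induction l with
  | nil => intro ts d; rfl
  | cons p rest ih => intro ts d; exact ih _ _

theorem pvGroups_getD (l : List (Int × String)) (d : PySem.Dict String (List Int)) (k : String) :
    (l.foldl sum_indices_groupStep d).getD k [] = d.getD k [] ++ pvOcc l k := by
  have h : l.foldl sum_indices_groupStep d
      = (l.map Prod.swap).foldl (fun d q => d.modify q.1 [] (· ++ [q.2])) d := by
    rw [List.foldl_map]
    rfl
  rw [h, PySem.Dict.getD_foldl_modify_append]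
  rfl

theorem pvOcc_append (l : List (Int × String)) (p : Int × String) (k : String) :
    pvOcc (l ++ [p]) k = pvOcc l k ++ (if p.2 == k then [p.1] else []) := by
  simp [pvOcc, List.filter_append]
  split_ifs <;> simp_all

theorem pvOcc_nil_of_not_mem (l : List (Int × String)) (k : String)
    (h : k ∉ l.map (·.2)) : pvOcc l k = [] := by
  simp only [pvOcc, List.map_eq_nil_iff, List.filter_eq_nil_iff]
  intro q hq
  simp only [List.mem_map] at hq
  obtain ⟨p, hp, rfl⟩ := hq
  simp only [Prod.swap, beq_iff_eq]
  intro hk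
  exact h (List.mem_map.mpr ⟨p, hp, hk⟩)

theorem pvSum_map_update (ks : List String) (hnd : ks.Nodup) (k0 : String) (hmem : k0 ∈ ks)
    (f g : String → Int) (h : ∀ k, k ≠ k0 → f k = g k) :
    (ks.map f).sum = (ks.map g).sum + (f k0 - g k0) := by
  induction ks with
  | nil => cases hmem
  | cons a t ih =>
    simp only [List.map_cons, List.sum_cons]
    rcases List.mem_cons.mp hmem with rfl | hmt
    · have : t.map f = t.map g := by
        apply List.map_congr_left
        intro x hx
        exact h x (fun hx0 => (List.nodup_cons.mp hnd).1 (hx0 ▸ hx))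
      rw [this]; ring
    · have ha : f a = g a := h a (fun h0 => (List.nodup_cons.mp hnd).1 (h0 ▸ hmt))
      rw [ha, ih (List.nodup_cons.mp hnd).2 hmt]; ring

-- the group-by extra term, as a sum over the distinct keys
def pvEX (l : List (Int × String)) : Int :=
  ((PySem.Set.ofList (l.map (·.2))).map (fun k => sum_indices_contrib (pvOcc l k))).sum

theorem pvValues_eq (l : List (Int × String)) :
    ((l.foldl sum_indices_groupStep PySem.Dict.empty).values.map sum_indices_contrib).sum
      = pvEX l := by
  have hfold : l.foldl sum_indices_groupStep PySem.Dict.empty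
      = l.foldl (fun d x => d.modify ((fun p : Int × String => p.2) x) []
          ((fun (_ : PySem.Dict String (List Int)) (p : Int × String) => (· ++ [p.1])) d x))
        PySem.Dict.empty := rfl
  have hnd : (l.foldl sum_indices_groupStep PySem.Dict.empty).keys.Nodup := by
    rw [hfold]
    exact PySem.Dict.nodup_keys_foldl_modify_key l (fun p => p.2) [] _ PySem.Dict.empty
      (by rw [PySem.Dict.keys_empty]; exact List.nodup_nil)
  rw [PySem.Dict.values_eq_map_keys _ hnd []]
  have hkeys : (l.foldl sum_indices_groupStep PySem.Dict.empty).keys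
      = PySem.Set.ofList (l.map (·.2)) := by
    rw [hfold, PySem.Dict.keys_foldl_modify_key, PySem.Dict.keys_empty,
      PySem.Set.update_nil_left]
  rw [List.map_map, hkeys]
  unfold pvEX
  apply congrArg
  apply List.map_congr_left
  intro k _
  simp only [Function.comp_apply, pvGroups_getD, PySem.Dict.getD_empty, List.nil_append]

theorem pvEX_append (l : List (Int × String)) (p : Int × String) :
    pvEX (l ++ [p]) = pvEX l + (pvOcc l p.2).sum := by
  unfold pvEX
  rw [List.map_append]
  simp only [List.map_cons, List.map_nil]
  rw [PySem.Set.ofList_append_singleton]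
  by_cases hmem : p.2 ∈ l.map (·.2)
  · rw [PySem.Set.add_of_mem ((PySem.Set.mem_ofList _ _).mpr hmem)]
    rw [pvSum_map_update (PySem.Set.ofList (l.map (·.2))) (PySem.Set.nodup_ofList _) p.2
        ((PySem.Set.mem_ofList _ _).mpr hmem)
        (fun k => sum_indices_contrib (pvOcc (l ++ [p]) k))
        (fun k => sum_indices_contrib (pvOcc l k))
        (by
          intro k hk
          simp only []
          rw [pvOcc_append]
          have hne : (p.2 == k) = false := by
            simp only [beq_eq_false_iff_ne]; exact fun h => hk h.symm
          rw [hne]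
          simp)]
    rw [pvOcc_append]
    simp only [beq_self_eq_true, if_pos, pvContrib_append]
    ring
  · rw [PySem.Set.add_of_not_mem (fun h => hmem ((PySem.Set.mem_ofList _ _).mp h))]
    rw [List.map_append, List.sum_append]
    have h1 : (PySem.Set.ofList (l.map (·.2))).map
          (fun k => sum_indices_contrib (pvOcc (l ++ [p]) k))
        = (PySem.Set.ofList (l.map (·.2))).map (fun k => sum_indices_contrib (pvOcc l k)) := by
      apply List.map_congr_left
      intro k hk
      have hkl : k ∈ l.map (·.2) := (PySem.Set.mem_ofList _ _).mp hk
      have hne : (p.2 == k) = false := by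
        simp only [beq_eq_false_iff_ne]; intro h; exact hmem (h ▸ hkl)
      rw [pvOcc_append, hne]
      simp
    rw [h1, pvOcc_nil_of_not_mem l p.2 hmem]
    simp only [List.map_cons, List.map_nil, List.sum_cons, List.sum_nil]
    rw [pvOcc_append, pvOcc_nil_of_not_mem l p.2 hmem]
    simp [pvContrib_singleton]

theorem pvMain (l : List (Int × String)) :
    ((l.foldl sum_indices_stepA ([], PySem.Dict.empty)).1).sum
      = (l.map (·.1)).sum + pvEX l := by
  induction l using List.reverseRecOn with
  | nil => rfl
  | append_singleton l p ih =>
    rw [List.foldl_append]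
    simp only [List.foldl_cons, List.foldl_nil, sum_indices_stepA]
    rw [List.sum_append, ih, pvSndA, pvGroups_getD, pvEX_append]
    simp only [PySem.Dict.getD_empty, List.nil_append, List.map_append, List.sum_append]
    simp
    ring

theorem pvRangeSum2 (m : Nat) : (List.range m).sum * 2 = m * (m - 1) := by
  induction m with
  | zero => rfl
  | succ k ih =>
    rw [List.range_succ]
    cases k with
    | zero => rfl
    | succ j =>
      simp only [List.sum_append, List.sum_cons, List.sum_nil, Nat.succ_sub_one] at *
      rw [Nat.add_mul, ih]
      ring

theorem pvGauss (m : Nat) :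
    PySem.Int.floordiv ((m : Int) * ((m : Int) - 1)) 2 = ((List.range m).sum : Int) := by
  cases m with
  | zero => decide
  | succ j =>
    have key : (((j + 1 : Nat)) : Int) * ((((j + 1 : Nat)) : Int) - 1)
        = (((List.range (j + 1)).sum * 2 : Nat) : Int) := by
      rw [pvRangeSum2, Nat.add_sub_cancel]
      push_cast
      ring
    rw [key]
    have h := PySem.Int.floordiv_natCast ((List.range (j + 1)).sum * 2) 2
    simp only [Nat.cast_ofNat] at h
    rw [h, Nat.mul_div_cancel _ (by norm_num)]

-- ===== VERDICT (by name: the statement is the Claim_ definition above) =====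
theorem sum_indices_spec : Claim_equal_sum_indices := by
  intro items _
  unfold Spec_sum_indices sum_indices sum_indices_alt
  dsimp only
  rw [pvMain, pvValues_eq, PySem.List.map_fst_enumerate]
  congr 1
  rw [pvGauss]
  rw [show (0 : Int) + (items.length : Int) = (items.length : Int) by ring]
  rw [PySem.List.pyRange_one]
  simp only [Int.sub_zero, Int.toNat_natCast, zero_add]
  exact (Nat.cast_list_sum (List.range items.length)).symm
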